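-- pv_equiv track=rewrite | github.com/smazik02/AiSD_L1_sort | Python/pokaz.py | ashape
-- ===== SOURCE A (Python) =====
-- def ashape(n):
--     x = int(n/2)
--     left = [0]*x
--     right = [0]*x
--     for i in range(x):
--         left[i] = i
--     for i in range(x):
--         right[i] = i
--     right.reverse()
--     return left+right
-- ===== SOURCE B (Python) =====
-- def ashape(n):
--     L = 2 * int(n / 2)
--     return [min(i, L - 1 - i) for i in range(L)]
-- ===== Notes on version B (the rewrite author's own statement) =====
-- stated objective: simpler
-- what changed: Replaced the two-half construction (ascending list, second list reversed, concatenation) with a single closed-form comprehension min(i, L-1-i) over range(2*int(n/2)).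
import Mathlib
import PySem

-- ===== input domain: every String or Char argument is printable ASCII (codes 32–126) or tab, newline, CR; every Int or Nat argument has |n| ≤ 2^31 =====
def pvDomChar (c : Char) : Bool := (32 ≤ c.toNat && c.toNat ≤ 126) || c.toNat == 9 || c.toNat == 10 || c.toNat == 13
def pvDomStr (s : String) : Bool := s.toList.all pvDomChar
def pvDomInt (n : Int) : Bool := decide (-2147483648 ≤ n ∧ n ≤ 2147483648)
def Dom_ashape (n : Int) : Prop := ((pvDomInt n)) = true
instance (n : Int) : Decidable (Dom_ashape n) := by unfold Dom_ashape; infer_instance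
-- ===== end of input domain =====

-- B replaces A's build-two-halves-and-reverse construction by one closed-form pass min(i, L-1-i); objective: simpler.

-- ===== PORT A =====
-- x = int(n/2): on |n| ≤ 2^31 the float n/2 is exact and int() truncates toward zero = Int.tdiv.
-- left = [0]*x then left[i] = i for i in range(x) produces [0,1,…,x-1]; likewise right, then reversed.
def ashape (n : Int) : List Int :=
  let x : Int := n.tdiv 2
  let left : List Int := (List.range x.toNat).map (fun i => Int.ofNat i)
  let right : List Int := (List.range x.toNat).map (fun i => Int.ofNat i)
  left ++ right.reverse

-- ===== PORT B =====
def ashape_alt (n : Int) : List Int :=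
  let L : Int := 2 * n.tdiv 2
  (List.range L.toNat).map (fun i => min (Int.ofNat i) (L - 1 - i))

-- ===== PRECONDITION & SPEC =====
def Spec_ashape (n : Int) (out : List Int) : Prop := out = ashape_alt n
instance (n : Int) (out : List Int) : Decidable (Spec_ashape n out) := by unfold Spec_ashape; infer_instance

-- ===== CLAIM (what is proved, stated in full; the proofs are below) =====
def Claim_equal_ashape : Prop := ∀ (n : Int), Dom_ashape n → Spec_ashape n (ashape n)

-- ===== LEMMAS AND PROOFS =====

-- the core identity over naturals
theorem ashape_key (m : Nat) :
    (List.range m).map (fun i => Int.ofNat i) ++ ((List.range m).map (fun i => Int.ofNat i)).reverse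
      = (List.range (2 * m)).map (fun i => min (Int.ofNat i) (2 * (m : Int) - 1 - i)) := by
  apply List.ext_getElem
  · simp; omega
  · intro i h1 h2
    simp only [List.length_append, List.length_map, List.length_reverse, List.length_range] at h1
    by_cases hi : i < m
    · rw [List.getElem_append_left (by simpa using hi)]
      simp only [List.getElem_map, List.getElem_range]
      have : (i : Int) ≤ 2 * (m : Int) - 1 - i := by omega
      simp [min_eq_left this]
    · rw [List.getElem_append_right (by simpa using hi)]
      simp only [List.getElem_reverse, List.getElem_map, List.getElem_range, List.length_map,
        List.length_range]
      have h2m : i < 2 * m := by simpa using h2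
      simp only [Int.ofNat_eq_natCast]
      omega

-- ===== VERDICT (by name: the statement is the Claim_ definition above) =====
theorem ashape_spec : Claim_equal_ashape := by
  intro n _
  unfold Spec_ashape ashape ashape_alt
  simp only []
  set x : Int := n.tdiv 2 with hx
  by_cases hpos : 0 ≤ x
  · have hL : (2 * x).toNat = 2 * x.toNat := by omega
    rw [hL]
    have := ashape_key x.toNat
    rw [this]
    congr 1
    funext i
    congr 1
    omega
  · have h1 : x.toNat = 0 := by omega
    have h2 : (2 * x).toNat = 0 := by omega
    simp [h1, h2]
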